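/- GENERATED by mk_final_copies.py from the proof of the farm's unit `residue_decode` (farm:residue_decode.1: Proof.lean) as the
   re-elaboration sweep compiled it — do not edit. -/
import Asan.CheckWalk
import Vorbis.Spec.Units.residue_decode
import Vorbis.Spec.Worked.residue_decode_Lemmas

open X86 X86.User Asan Vorbis Vorbis.Spec

set_option maxRecDepth 4000
set_option maxHeartbeats 16000000

namespace Vorbis.Spec.residue_decode

/-- The address of `idiv DWORD PTR [r12]` (0x10ea96, C 2114): a cut point of this proof, because the walker does not read the
memory operand of an `idiv` through the stores before it. -/
abbrev atIdiv : Word := 0x10ea96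

/-- The address of `call codebook_decode_step` (0x10eac6, C 2116): it names the goals of `u_call`. -/
abbrev atCallStep : Word := 0x10eac6

/-- The address of `call codebook_decode` (0x10eb0e, C 2120): it names the goals of `u_call`. -/
abbrev atCallDec : Word := 0x10eb0e

end Vorbis.Spec.residue_decode

/-- `residue_decode` satisfies its contract. The prologue (six pushes, `sub rsp, 18H`, the spill of `f`), then one of two loops:
rtype = 0 — the check and the `idiv` of `n / book->dimensions` (no fault: K1), the loop 2115 counted by `k < step` around the
call of codebook_decode_step; rtype ≠ 0 — the loop 2119 around the call of codebook_decode, `k += d` after a second check of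
`book->dimensions`. Loop invariant of both: the registers, residue_decode's footprint so far (`hsame`), no shadow byte written
(`hun`), `Bits f` kept and μ not increased (`hrp`), the eight stack slots. The callees' preconditions come from
`Vorbis.Spec.residue_decode.carry_book` (`BookPre.carry`), their footprints are put inside ours by `same_through` / `slot_through`. -/
theorem Vorbis.Spec.Worked.residue_decode_ok : Vorbis.Spec.residue_decode.Statement := by
  intro Lay hLay μ hμ u₀ hcode hload4 hstep hdec others frames Blk len u ret he hpre
  v_entry he
  obtain ⟨hbook, hsum, hn1, hwin⟩ := hpre
  simp only [argU32] at hsum hn1 hwin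
  have hsh : ShadowPre others frames u := hbook.reader.shadow
  have hsp := hsh.rsp
  -- where `*f`, the struct at `book` and the window of floats are
  have hfw := hbook.reader.where_obj
  obtain ⟨B, hB, hBin⟩ := hbook.book
  simp only [vblock, Vorbis.Off.sizeof.Codebook] at hBin
  have hBw := blk_where hbook.reader.env.live hsh.inv hsh.offText (by omega) hB (by omega)
  have hcw : 0x119d40 ≤ (u.reg .rsi).toNat ∧ (u.reg .rsi).toNat + 2120 ≤ 0xC00000 ∧
      ((u.reg .rsp).toNat + 8 ≤ (u.reg .rsi).toNat ∨ (u.reg .rsi).toNat + 2120 ≤ 0x700000 ∨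
        0x800000 ≤ (u.reg .rsi).toNat) := by
    have e : L.textHi = 0x119d40 := rfl
    omega
  have hsite : Site (Live (stackObjs frames ++ others)) (u.reg .rsi).toNat 4 :=
    Site.of_blk hbook.reader.env.live hB (by omega) (by omega) (by decide)
  clear hBw
  have hww := site_where hsh.inv hsh.offText (by omega) hwin.site
  have hwo := hwin.offObj
  have hwb := hwin.offBook
  have hfb := hbook.apart.book
  simp only [vblock, Vorbis.Off.sizeof.Codebook, Vorbis.Off.sizeof.stb_vorbis] at hwo hwb hfb
  -- … all three off residue_decode's whole stack `[rsp - 592, rsp + 8)`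
  have hfS : (u.reg .rsp).toNat + 8 ≤ (u.reg .rdi).toNat ∨ (u.reg .rdi).toNat + 1808 ≤ (u.reg .rsp).toNat - 592 := by
    omega
  have hwS : (u.reg .rsp).toNat + 8 ≤ (u.reg .rdx).toNat + 4 * ((u.reg .rcx).toNat % 2 ^ 32) ∨
      (u.reg .rdx).toNat + 4 * ((u.reg .rcx).toNat % 2 ^ 32) + 4 * ((u.reg .r8).toNat % 2 ^ 32) ≤
        (u.reg .rsp).toNat - 592 := by
    omega
  -- `book->dimensions` (K1: 1 ≤ d ≤ 65535), as the load reads it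
  obtain ⟨dN, rd, hd1, hd2, hdim⟩ : ∃ dN : Nat, u.mem.readLE (u.reg .rsi) 4 = dN ∧ 1 ≤ dN ∧ dN ≤ 65535 ∧
      Codebook.dimensions u.mem (u.reg .rsi).toNat = (dN : Int) := by
    have hK1 := hbook.cb.K1
    have h1 := hK1.dim_pos
    have h2 := hK1.dim_le
    have e : Codebook.dimensions u.mem (u.reg .rsi).toNat = sint32 (u.mem.readLE (u.reg .rsi) 4) := by
      simp only [vacc, voff, Nat.add_zero, Mem.i32_def]
      unfold Mem.u32
      rw [addr_toNat]
    have hc := sint32_cases (u.mem.readLE (u.reg .rsi) 4)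
    have hlt := u.mem.u32_lt (u.reg .rsi).toNat
    unfold Mem.u32 at hlt
    rw [addr_toNat] at hlt
    refine ⟨_, rfl, ?_, ?_, ?_⟩
    · omega
    · omega
    · omega
  -- to the `idiv` at 0x10ea96 (C 2114: `ret1 + 4`, after `mov eax, r13d ; cdq`) and to the head of the loop 2119
  u_walk hcode [hμ.vendor] until [Vorbis.Spec.residue_decode.atIdiv, Vorbis.L.residue_decode.loop2] span [Vorbis.L.textLo, Vorbis.L.textHi] side (v_side)
  case check_10ea8d =>
    -- 0x10ea8d, C 2114: load4 book->dimensions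
    have hun : ShadowUntouched u.mem s_10ea8d.mem := by v_untouched
    exact Vorbis.Spec.check_site hsh.inv hun hsite rfl
  rotate_left
  · -- rtype = 0, at the `idiv`: the divisor is `d`
    have hread : s_10ea95.mem.readLE (u.reg .rsi) 4 = dN := by
      u_frame rd
    have hdiv := Vorbis.Spec.residue_decode.idiv_nonneg (Word.part Width.w32 (u.reg .r8)) (BitVec.ofNat 32 dN)
      (by rw [Asan.part32_toNat]; omega)
      (by rw [Vorbis.Spec.toNat_ofNat32 _ (by omega)]; exact hd1)
      (by rw [Vorbis.Spec.toNat_ofNat32 _ (by omega)]; omega)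
    rw [Asan.part32_toNat, Vorbis.Spec.toNat_ofNat32 _ (show dN < 2 ^ 32 by omega)] at hdiv
    u_walk hcode [hμ.vendor] until [Vorbis.L.residue_decode.loop1] span [Vorbis.L.textLo, Vorbis.L.textHi] side (v_side)
    case side_nofault =>
      -- 0x10ea96, C 2114: `idiv` by `book->dimensions` ≥ 1 (K1) of `n` ≥ 0 does not fault
      exact absurd (hdiv.symm.trans hopt1) (Option.some_ne_none _)
    -- 0x10eaa2, the head of the loop 2115 `for (k=0; k < step; ++k)`: step = n / d
    have hqr := Option.some.inj (hopt_10ea96.symm.trans hdiv)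
    obtain ⟨n, hn⟩ : ∃ n : Nat, (u.reg .r8).toNat % 2 ^ 32 = n := ⟨_, rfl⟩
    obtain ⟨off, hoff⟩ : ∃ off : Nat, (u.reg .rcx).toNat % 2 ^ 32 = off := ⟨_, rfl⟩
    rw [hn] at hqr
    rw [hn, hoff] at hsum hww hwo hwb hwin hwS
    rw [hn] at hn1
    have hstepd : n / dN * dN ≤ n := Nat.div_mul_le_self n dN
    have hstepn : n / dN ≤ n := Nat.div_le_self n dN
    have h15 : s_10ea9d.reg .r15 = UInt64.ofNat (n / dN) := by
      rw [w_r15, hqr]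
      exact Vorbis.Spec.residue_decode.ofBV_ofNat32_lt _ (by omega)
    obtain ⟨step, hstp⟩ : ∃ step : Nat, n / dN = step := ⟨_, rfl⟩
    rw [hstp] at h15 hstepd hstepn
    have h13 : s_10ea9d.reg .r13 = UInt64.ofNat n := by
      rw [w_r13, Vorbis.Spec.residue_decode.ofBV_part32, hn]
    have hbp : s_10ea9d.reg .rbp = UInt64.ofNat off := by
      rw [w_rbp, Vorbis.Spec.residue_decode.ofBV_part32, hoff]
    obtain ⟨k, hk, hkle⟩ : ∃ k : Nat, s_10ea9d.reg .rbx = UInt64.ofNat k ∧ k ≤ step := by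
      refine ⟨0, ?_, Nat.zero_le _⟩
      rw [w_rbx, ofBV_eq_addr _ (by decide), hbr_10ea81]
      rfl
    -- the memory: what stays true
    have hsame : Mem.SameExcept [⟨(u.reg .rsp).toNat - 592, (u.reg .rsp).toNat⟩,
        ⟨(u.reg .rdi).toNat + 48, (u.reg .rdi).toNat + 56⟩, ⟨(u.reg .rdi).toNat + 84, (u.reg .rdi).toNat + 96⟩,
        ⟨(u.reg .rdi).toNat + 136, (u.reg .rdi).toNat + 144⟩, ⟨(u.reg .rdi).toNat + 1484, (u.reg .rdi).toNat + 1749⟩,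
        ⟨(u.reg .rdi).toNat + 1752, (u.reg .rdi).toNat + 1784⟩,
        ⟨(u.reg .rdx).toNat + 4 * off, (u.reg .rdx).toNat + 4 * off + 4 * n⟩] u.mem s_10ea9d.mem := by
      u_same
    have hun : ShadowUntouched u.mem s_10ea9d.mem := by v_untouched
    have hrp : ReaderPost Blk len u.mem s_10ea9d.mem (u.reg .rdi).toNat := by
      have hw : Mem.SameExcept [⟨(u.reg .rsp).toNat - 592, (u.reg .rsp).toNat⟩] u.mem s_10ea9d.mem := by
        u_same
      have hb := Reader.reader_of_window hbook.reader.bits hw (by omega)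
      exact ⟨hb.1, Nat.le_of_eq hb.2⟩
    have hs0 : UInt64.ofNat (s_10ea9d.mem.readLE (u.reg .rsp) 8) = ret := by u_resolve
    have hs1 : UInt64.ofNat (s_10ea9d.mem.readLE (u.reg .rsp - 8) 8) = u.reg .r15 := by u_resolve
    have hs2 : UInt64.ofNat (s_10ea9d.mem.readLE (u.reg .rsp - 16) 8) = u.reg .r14 := by u_resolve
    have hs3 : UInt64.ofNat (s_10ea9d.mem.readLE (u.reg .rsp - 24) 8) = u.reg .r13 := by u_resolve
    have hs4 : UInt64.ofNat (s_10ea9d.mem.readLE (u.reg .rsp - 32) 8) = u.reg .r12 := by u_resolve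
    have hs5 : UInt64.ofNat (s_10ea9d.mem.readLE (u.reg .rsp - 40) 8) = u.reg .rbp := by u_resolve
    have hs6 : UInt64.ofNat (s_10ea9d.mem.readLE (u.reg .rsp - 48) 8) = u.reg .rbx := by u_resolve
    have hsf : UInt64.ofNat (s_10ea9d.mem.readLE (u.reg .rsp - 64) 8) = u.reg .rdi := by u_resolve
    have hdf : s_10ea9d.flags .df = false := by
      rw [w_flags]
      simp only [X86.User.df_setStatus]
      exact w_df_10ea8d
    have hmx : s_10ea9d.mxcsr &&& 0x1F80 = 0x1F80 := by
      rw [w_mxcsr]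
      exact he_mx
    replace w_kept := w_kept.mono_all (S' := [.rsi, .r8, .r15, .rdi, .rbx, .r13, .rbp, .r14, .r12, .rsp, .rax, .rcx, .rdx,
      .r9, .r10, .r11, .r16, .r17, .r18, .r19, .r20, .r21, .r22, .r23, .r24, .r25, .r26, .r27, .r28, .r29, .r30, .r31])
      (by rfl)
    clear w_mem w_flags w_mxcsr w_rbx w_r15 w_r13 w_rbp w_rax w_rdx w_rdi
    try clear w_zmm
    u_loop [k] (fun v => step - (v.reg .rbx).toNat)
    u_walk hcode [hμ.vendor] until [Vorbis.L.residue_decode.loop1, Vorbis.L.codebook_decode_step.entry] span [Vorbis.L.textLo, Vorbis.L.textHi] side (v_side)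
    · -- the exit `k ≥ step` (0x10ead1, C 2126): `mov eax, 1`, the epilogue, the `ret`
      refine ReachVia.done (Or.inl ?_)
      v_returned
      · -- the post: no shadow byte written, `Bits f` kept and μ not increased, eax = 1
        refine ⟨?_, ?_, Or.inr ?_⟩
        · rw [w_mem]
          exact hun
        · rw [w_mem]
          exact hrp
        · rw [w_rax]
          rfl
      · -- the footprint
        simp only [X86.User.Spec.footprint, vspec, argU32, hn, hoff]
        rw [w_mem]
        exact hsame
    · -- 0x10eac6, C 2116: at the entry of codebook_decode_step(f, book, target+offset+k, n-offset-k, step)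
      have hbr : k < step := by
        rw [Vorbis.Spec.residue_decode.part32_ofNat_toInt step (by omega),
          Vorbis.Spec.residue_decode.part32_ofNat_toInt k (by omega)] at hbr_10eaa5
        omega
      have hune : ShadowUntouched u.mem s_10eac6.mem := by v_untouched
      have hsh' : ShadowPre others frames s_10eac6 := by
        refine hsh.call hune ?_ ?_ ?_
        · rw [w_rsp]
          u_omega
        · rw [w_rsp]
          u_omega
        · rw [w_rsp]
          u_omega
      have hst := Reader.store_off_obj hrp.bits (u.reg .rsp - 80) 8 1108683 (by u_omega) (by u_omega)
      rw [← w_mem] at hst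
      have hs' : Mem.SameExcept [⟨(u.reg .rsp).toNat - 592, (u.reg .rsp).toNat⟩,
          ⟨(u.reg .rdi).toNat + 48, (u.reg .rdi).toNat + 56⟩, ⟨(u.reg .rdi).toNat + 84, (u.reg .rdi).toNat + 96⟩,
          ⟨(u.reg .rdi).toNat + 136, (u.reg .rdi).toNat + 144⟩, ⟨(u.reg .rdi).toNat + 1484, (u.reg .rdi).toNat + 1749⟩,
          ⟨(u.reg .rdi).toNat + 1752, (u.reg .rdi).toNat + 1784⟩,
          ⟨(u.reg .rdx).toNat + 4 * off, (u.reg .rdx).toNat + 4 * off + 4 * n⟩] u.mem s_10eac6.mem := by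
        rw [w_mem]
        exact hsame.step_writeLE' _ 8 _ (by u_omega)
          ⟨_, List.mem_cons_self, by simp only []; u_omega, by simp only []; u_omega⟩
      -- the stack slots at the callee's entry
      have hs0e : UInt64.ofNat (s_10eac6.mem.readLE (u.reg .rsp) 8) = ret := by u_frame hs0
      have hs1e : UInt64.ofNat (s_10eac6.mem.readLE (u.reg .rsp - 8) 8) = u.reg .r15 := by u_frame hs1
      have hs2e : UInt64.ofNat (s_10eac6.mem.readLE (u.reg .rsp - 16) 8) = u.reg .r14 := by u_frame hs2
      have hs3e : UInt64.ofNat (s_10eac6.mem.readLE (u.reg .rsp - 24) 8) = u.reg .r13 := by u_frame hs3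
      have hs4e : UInt64.ofNat (s_10eac6.mem.readLE (u.reg .rsp - 32) 8) = u.reg .r12 := by u_frame hs4
      have hs5e : UInt64.ofNat (s_10eac6.mem.readLE (u.reg .rsp - 40) 8) = u.reg .rbp := by u_frame hs5
      have hs6e : UInt64.ofNat (s_10eac6.mem.readLE (u.reg .rsp - 48) 8) = u.reg .rbx := by u_frame hs6
      have hsfe : UInt64.ofNat (s_10eac6.mem.readLE (u.reg .rsp - 64) 8) = u.reg .rdi := by u_frame hsf
      obtain ⟨hbp', hwin', hdim'⟩ :=
        Vorbis.Spec.residue_decode.carry_book hbook hwin (by omega) hsh' w_rdi w_rsi hst.1.bits hs'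
      rw [hdim] at hdim'
      have hr8 : s_10eac6.reg .r8 = UInt64.ofNat step := by
        rw [w_r8]
        exact Vorbis.Spec.residue_decode.ofBV_part32_ofNat step (by omega)
      have hrdx : (s_10eac6.reg .rdx).toNat = (u.reg .rdx).toNat + 4 * (off + k) := by
        rw [w_rdx]
        exact Vorbis.Spec.residue_decode.lea2_toNat _ off k (by omega) (by omega) (by omega)
      have hfit := Vorbis.Spec.residue_decode.step_fits hdim' hd1 hstepd hbr (argInt (s_10eac6.reg .rcx))
      u_call (hstep others frames Blk len) at Vorbis.Spec.residue_decode.atCallStep side (v_side)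
      case call_inv => v_inv
      case pre_10eac6 =>
        -- the precondition of codebook_decode_step: `BookPre` again, 0 ≤ step, the strided window inside ours
        refine ⟨hbp', ?_, ?_⟩
        · rw [hr8, Vorbis.Spec.residue_decode.argInt_ofNat step (by omega)]
          exact Int.natCast_nonneg _
        · rw [w_rdi, w_rsi, hr8, Vorbis.Spec.residue_decode.argU32_ofNat step (by omega), hrdx]
          intro hpos
          exact Vorbis.Spec.residue_decode.step_window hwin' hdim' hd1 hstepd hbr (by omega) _ hpos
      -- after the return of codebook_decode_step (0x10eacb)
      have w_eq := Vorbis.conv_code_eqOn w_code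
      have w_df := (show X86.User.abiInv _ from w_inv).1
      have w_mx := (show X86.User.abiInv _ from w_inv).2
      obtain ⟨hpu, hpr, hres⟩ := w_post
      -- the callee's footprint, as numbers over our entry state: its float window is a part of ours (`hfit`)
      simp only [X86.User.Spec.footprint, vspec, w_rsp_10eac6, w_rdi_10eac6, w_rsi_10eac6, hrdx, hr8] at w_same
      rw [Vorbis.Spec.residue_decode.argU32_ofNat step (by omega)] at w_same
      generalize stepBytes (decodeLen s_10eac6.mem (u.reg .rsi).toNat (argInt (s_10eac6.reg .rcx))) step = X at w_same hfit
      have hsp' : (u.reg .rsp - 80).toNat = (u.reg .rsp).toNat - 80 := by u_omega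
      have hfS' : (u.reg .rsp).toNat + 8 ≤ (u.reg .rdi).toNat ∨ (u.reg .rdi).toNat + 1808 ≤ (u.reg .rsp - 80).toNat := by
        omega
      have hwS' : (u.reg .rsp).toNat + 8 ≤ (u.reg .rdx).toNat + 4 * (off + k) ∨
          (u.reg .rdx).toNat + 4 * (off + k) + X ≤ (u.reg .rsp - 80).toNat := by
        omega
      have hsame' := Vorbis.Spec.residue_decode.same_through hs' w_same (by omega) (by omega) (by omega) (by omega)
      -- the stack slots, `Bits f`, the shadow after the return
      have hs0' := Vorbis.Spec.residue_decode.slot_through (top := (u.reg .rsp).toNat + 8) w_same hs0e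
        (by u_omega) (by u_omega) (by omega) hfS' hwS'
      have hs1' := Vorbis.Spec.residue_decode.slot_through (top := (u.reg .rsp).toNat + 8) w_same hs1e
        (by u_omega) (by u_omega) (by omega) hfS' hwS'
      have hs2' := Vorbis.Spec.residue_decode.slot_through (top := (u.reg .rsp).toNat + 8) w_same hs2e
        (by u_omega) (by u_omega) (by omega) hfS' hwS'
      have hs3' := Vorbis.Spec.residue_decode.slot_through (top := (u.reg .rsp).toNat + 8) w_same hs3e
        (by u_omega) (by u_omega) (by omega) hfS' hwS'
      have hs4' := Vorbis.Spec.residue_decode.slot_through (top := (u.reg .rsp).toNat + 8) w_same hs4e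
        (by u_omega) (by u_omega) (by omega) hfS' hwS'
      have hs5' := Vorbis.Spec.residue_decode.slot_through (top := (u.reg .rsp).toNat + 8) w_same hs5e
        (by u_omega) (by u_omega) (by omega) hfS' hwS'
      have hs6' := Vorbis.Spec.residue_decode.slot_through (top := (u.reg .rsp).toNat + 8) w_same hs6e
        (by u_omega) (by u_omega) (by omega) hfS' hwS'
      have hsf' := Vorbis.Spec.residue_decode.slot_through (top := (u.reg .rsp).toNat + 8) w_same hsfe
        (by u_omega) (by u_omega) (by omega) hfS' hwS'
      rw [w_rdi_10eac6] at hpr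
      have hrp' : ReaderPost Blk len u.mem s_10eac6r.mem (u.reg .rdi).toNat := hrp.trans (hst.1.trans hpr)
      have hun' : ShadowUntouched u.mem s_10eac6r.mem := Mem.EqOn.trans hune hpu
      clear hs0e hs1e hs2e hs3e hs4e hs5e hs6e hsfe hs0 hs1 hs2 hs3 hs4 hs5 hs6 hsf hsame hun hrp hs' hst hune hpu hpr
      rcases hres with w_rax | w_rax
      · -- eax = 0 (0x10eacf, C 2116 `return FALSE`): `jmp 10ead6`, the epilogue, the `ret`
        u_walk hcode [hμ.vendor] until [Vorbis.L.residue_decode.loop1] span [Vorbis.L.textLo, Vorbis.L.textHi] side (v_side)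
        · exact absurd (by decide) hbr_10eacd
        · refine ReachVia.done (Or.inl ?_)
          v_returned
          · refine ⟨?_, ?_, Or.inl ?_⟩
            · rw [w_mem]
              exact hun'
            · rw [w_mem]
              exact hrp'
            · exact w_rax
          · simp only [X86.User.Spec.footprint, vspec, argU32, hn, hoff]
            rw [w_mem]
            exact hsame'
      · -- eax = 1: the back edge 0x10ea9f `add ebx, 1`
        u_walk hcode [hμ.vendor] until [Vorbis.L.residue_decode.loop1] span [Vorbis.L.textLo, Vorbis.L.textHi] side (v_side)
        · u_loop_back [k + 1]
          · rw [w_rbx]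
            exact Vorbis.Spec.residue_decode.add32_ofNat k 1 (by omega)
          · omega
          · rw [w_flags]
            simp only [X86.User.df_setStatus]
            exact w_df
          · rw [w_mxcsr]
            exact w_mx
          · rw [w_rbx, Vorbis.Spec.residue_decode.add32_ofNat k 1 (by omega), UInt64.toNat_ofNat', UInt64.toNat_ofNat']
            omega
        · exact absurd hbr_10eacd (by decide)
  · -- rtype ≠ 0: 0x10eaf5, the head of the loop 2119 `for (k=0; k < n; )`
    obtain ⟨n, hn⟩ : ∃ n : Nat, (u.reg .r8).toNat % 2 ^ 32 = n := ⟨_, rfl⟩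
    obtain ⟨off, hoff⟩ : ∃ off : Nat, (u.reg .rcx).toNat % 2 ^ 32 = off := ⟨_, rfl⟩
    rw [hn, hoff] at hsum hww hwo hwb hwin hwS
    rw [hn] at hn1
    have h13 : s_10eb1e.reg .r13 = UInt64.ofNat n := by
      rw [w_r13, Vorbis.Spec.residue_decode.ofBV_part32, hn]
    obtain ⟨k, hk, hbp, hkle⟩ : ∃ k : Nat, s_10eb1e.reg .rbx = UInt64.ofNat k ∧
        s_10eb1e.reg .rbp = UInt64.ofNat (off + k) ∧ k ≤ 73727 := by
      refine ⟨0, ?_, ?_, Nat.zero_le _⟩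
      · rw [w_rbx]
        rfl
      · rw [w_rbp, Vorbis.Spec.residue_decode.ofBV_part32, hoff]
        rfl
    -- the memory: what stays true
    have hsame : Mem.SameExcept [⟨(u.reg .rsp).toNat - 592, (u.reg .rsp).toNat⟩,
        ⟨(u.reg .rdi).toNat + 48, (u.reg .rdi).toNat + 56⟩, ⟨(u.reg .rdi).toNat + 84, (u.reg .rdi).toNat + 96⟩,
        ⟨(u.reg .rdi).toNat + 136, (u.reg .rdi).toNat + 144⟩, ⟨(u.reg .rdi).toNat + 1484, (u.reg .rdi).toNat + 1749⟩,
        ⟨(u.reg .rdi).toNat + 1752, (u.reg .rdi).toNat + 1784⟩,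
        ⟨(u.reg .rdx).toNat + 4 * off, (u.reg .rdx).toNat + 4 * off + 4 * n⟩] u.mem s_10eb1e.mem := by
      u_same
    have hun : ShadowUntouched u.mem s_10eb1e.mem := by v_untouched
    have hrp : ReaderPost Blk len u.mem s_10eb1e.mem (u.reg .rdi).toNat := by
      have hw : Mem.SameExcept [⟨(u.reg .rsp).toNat - 592, (u.reg .rsp).toNat⟩] u.mem s_10eb1e.mem := by
        u_same
      have hb := Reader.reader_of_window hbook.reader.bits hw (by omega)
      exact ⟨hb.1, Nat.le_of_eq hb.2⟩
    have hs0 : UInt64.ofNat (s_10eb1e.mem.readLE (u.reg .rsp) 8) = ret := by u_resolve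
    have hs1 : UInt64.ofNat (s_10eb1e.mem.readLE (u.reg .rsp - 8) 8) = u.reg .r15 := by u_resolve
    have hs2 : UInt64.ofNat (s_10eb1e.mem.readLE (u.reg .rsp - 16) 8) = u.reg .r14 := by u_resolve
    have hs3 : UInt64.ofNat (s_10eb1e.mem.readLE (u.reg .rsp - 24) 8) = u.reg .r13 := by u_resolve
    have hs4 : UInt64.ofNat (s_10eb1e.mem.readLE (u.reg .rsp - 32) 8) = u.reg .r12 := by u_resolve
    have hs5 : UInt64.ofNat (s_10eb1e.mem.readLE (u.reg .rsp - 40) 8) = u.reg .rbp := by u_resolve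
    have hs6 : UInt64.ofNat (s_10eb1e.mem.readLE (u.reg .rsp - 48) 8) = u.reg .rbx := by u_resolve
    have hsf : UInt64.ofNat (s_10eb1e.mem.readLE (u.reg .rsp - 64) 8) = u.reg .rdi := by u_resolve
    have hdf : s_10eb1e.flags .df = false := by
      rw [w_flags]
      simp only [X86.User.df_setStatus]
      exact he_df
    have hmx : s_10eb1e.mxcsr &&& 0x1F80 = 0x1F80 := by
      rw [w_mxcsr]
      exact he_mx
    replace w_kept := w_kept.mono_all (S' := [.rsi, .r8, .r15, .rdi, .rbx, .r13, .rbp, .r14, .r12, .rsp, .rax, .rcx, .rdx,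
      .r9, .r10, .r11, .r16, .r17, .r18, .r19, .r20, .r21, .r22, .r23, .r24, .r25, .r26, .r27, .r28, .r29, .r30, .r31])
      (by rfl)
    clear w_mem w_flags w_mxcsr w_rbx w_r13 w_rbp
    u_loop [k] (fun v => 80000 - (v.reg .rbx).toNat)
    u_walk hcode [hμ.vendor] until [Vorbis.L.residue_decode.loop2, Vorbis.L.codebook_decode.entry] span [Vorbis.L.textLo, Vorbis.L.textHi] side (v_side)
    · -- the exit `k ≥ n` (0x10eb20, C 2126): `mov eax, 1`, `jmp 10ead6`, the epilogue, the `ret`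
      refine ReachVia.done (Or.inl ?_)
      v_returned
      · -- the post: no shadow byte written, `Bits f` kept and μ not increased, eax = 1
        refine ⟨?_, ?_, Or.inr ?_⟩
        · rw [w_mem]
          exact hun
        · rw [w_mem]
          exact hrp
        · rw [w_rax]
          rfl
      · -- the footprint
        simp only [X86.User.Spec.footprint, vspec, argU32, hn, hoff]
        rw [w_mem]
        exact hsame
    · -- 0x10eb0e, C 2120: at the entry of codebook_decode(f, book, target+offset, n-k)
      have hbr : k < n := by
        rw [Vorbis.Spec.residue_decode.part32_ofNat_toInt n (by omega),
          Vorbis.Spec.residue_decode.part32_ofNat_toInt k (by omega)] at hbr_10eaf8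
        omega
      have hune : ShadowUntouched u.mem s_10eb0e.mem := by v_untouched
      have hsh' : ShadowPre others frames s_10eb0e := by
        refine hsh.call hune ?_ ?_ ?_
        · rw [w_rsp]
          u_omega
        · rw [w_rsp]
          u_omega
        · rw [w_rsp]
          u_omega
      have hst := Reader.store_off_obj hrp.bits (u.reg .rsp - 80) 8 1108755 (by u_omega) (by u_omega)
      rw [← w_mem] at hst
      have hs' : Mem.SameExcept [⟨(u.reg .rsp).toNat - 592, (u.reg .rsp).toNat⟩,
          ⟨(u.reg .rdi).toNat + 48, (u.reg .rdi).toNat + 56⟩, ⟨(u.reg .rdi).toNat + 84, (u.reg .rdi).toNat + 96⟩,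
          ⟨(u.reg .rdi).toNat + 136, (u.reg .rdi).toNat + 144⟩, ⟨(u.reg .rdi).toNat + 1484, (u.reg .rdi).toNat + 1749⟩,
          ⟨(u.reg .rdi).toNat + 1752, (u.reg .rdi).toNat + 1784⟩,
          ⟨(u.reg .rdx).toNat + 4 * off, (u.reg .rdx).toNat + 4 * off + 4 * n⟩] u.mem s_10eb0e.mem := by
        rw [w_mem]
        exact hsame.step_writeLE' _ 8 _ (by u_omega)
          ⟨_, List.mem_cons_self, by simp only []; u_omega, by simp only []; u_omega⟩
      -- the stack slots at the callee's entry
      have hs0e : UInt64.ofNat (s_10eb0e.mem.readLE (u.reg .rsp) 8) = ret := by u_frame hs0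
      have hs1e : UInt64.ofNat (s_10eb0e.mem.readLE (u.reg .rsp - 8) 8) = u.reg .r15 := by u_frame hs1
      have hs2e : UInt64.ofNat (s_10eb0e.mem.readLE (u.reg .rsp - 16) 8) = u.reg .r14 := by u_frame hs2
      have hs3e : UInt64.ofNat (s_10eb0e.mem.readLE (u.reg .rsp - 24) 8) = u.reg .r13 := by u_frame hs3
      have hs4e : UInt64.ofNat (s_10eb0e.mem.readLE (u.reg .rsp - 32) 8) = u.reg .r12 := by u_frame hs4
      have hs5e : UInt64.ofNat (s_10eb0e.mem.readLE (u.reg .rsp - 40) 8) = u.reg .rbp := by u_frame hs5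
      have hs6e : UInt64.ofNat (s_10eb0e.mem.readLE (u.reg .rsp - 48) 8) = u.reg .rbx := by u_frame hs6
      have hsfe : UInt64.ofNat (s_10eb0e.mem.readLE (u.reg .rsp - 64) 8) = u.reg .rdi := by u_frame hsf
      obtain ⟨hbp', hwin', hdim'⟩ :=
        Vorbis.Spec.residue_decode.carry_book hbook hwin (by omega) hsh' w_rdi w_rsi hst.1.bits hs'
      rw [hdim] at hdim'
      have hrcx : argInt (s_10eb0e.reg .rcx) = ((n - k : Nat) : Int) := by
        rw [w_rcx]
        exact Vorbis.Spec.residue_decode.argInt_sub32 n k (by omega) (by omega)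
      have hrdx : (s_10eb0e.reg .rdx).toNat = (u.reg .rdx).toNat + 4 * (off + k) := by
        rw [w_rdx]
        exact Vorbis.Spec.residue_decode.lea1_toNat _ (off + k) (by omega) (by omega)
      have hfit := Vorbis.Spec.residue_decode.decodeLen_le_len (mem := s_10eb0e.mem) (c := (u.reg .rsi).toNat)
        (argInt (s_10eb0e.reg .rcx)) (n - k) (Int.le_of_eq hrcx)
      u_call (hdec others frames Blk len) at Vorbis.Spec.residue_decode.atCallDec side (v_side)
      case call_inv => v_inv
      case pre_10eb0e =>
        -- the precondition of codebook_decode: `BookPre` again, the `min(n − k, d)` floats inside our window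
        refine ⟨hbp', ?_⟩
        rw [w_rdi, w_rsi, hrdx]
        intro hpos
        exact Vorbis.Spec.residue_decode.dec_window hwin' _ (Int.le_of_eq hrcx) hbr hpos
      -- after the return of codebook_decode (0x10eb13)
      have w_eq := Vorbis.conv_code_eqOn w_code
      have w_df := (show X86.User.abiInv _ from w_inv).1
      have w_mx := (show X86.User.abiInv _ from w_inv).2
      obtain ⟨hpu, hpr, hres⟩ := w_post
      -- the callee's footprint, as numbers over our entry state: its float window is a part of ours (`hfit`)
      simp only [X86.User.Spec.footprint, vspec, w_rsp_10eb0e, w_rdi_10eb0e, w_rsi_10eb0e, hrdx] at w_same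
      generalize decodeLen s_10eb0e.mem (u.reg .rsi).toNat (argInt (s_10eb0e.reg .rcx)) = X at w_same hfit
      have hsp' : (u.reg .rsp - 80).toNat = (u.reg .rsp).toNat - 80 := by u_omega
      have hfS' : (u.reg .rsp).toNat + 8 ≤ (u.reg .rdi).toNat ∨ (u.reg .rdi).toNat + 1808 ≤ (u.reg .rsp - 80).toNat := by
        omega
      have hwS' : (u.reg .rsp).toNat + 8 ≤ (u.reg .rdx).toNat + 4 * (off + k) ∨
          (u.reg .rdx).toNat + 4 * (off + k) + 4 * X ≤ (u.reg .rsp - 80).toNat := by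
        omega
      have hsame' := Vorbis.Spec.residue_decode.same_through hs' w_same (by omega) (by omega) (by omega) (by omega)
      -- the stack slots, `Bits f`, the shadow, `book->dimensions` after the return
      have hs0' := Vorbis.Spec.residue_decode.slot_through (top := (u.reg .rsp).toNat + 8) w_same hs0e
        (by u_omega) (by u_omega) (by omega) hfS' hwS'
      have hs1' := Vorbis.Spec.residue_decode.slot_through (top := (u.reg .rsp).toNat + 8) w_same hs1e
        (by u_omega) (by u_omega) (by omega) hfS' hwS'
      have hs2' := Vorbis.Spec.residue_decode.slot_through (top := (u.reg .rsp).toNat + 8) w_same hs2e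
        (by u_omega) (by u_omega) (by omega) hfS' hwS'
      have hs3' := Vorbis.Spec.residue_decode.slot_through (top := (u.reg .rsp).toNat + 8) w_same hs3e
        (by u_omega) (by u_omega) (by omega) hfS' hwS'
      have hs4' := Vorbis.Spec.residue_decode.slot_through (top := (u.reg .rsp).toNat + 8) w_same hs4e
        (by u_omega) (by u_omega) (by omega) hfS' hwS'
      have hs5' := Vorbis.Spec.residue_decode.slot_through (top := (u.reg .rsp).toNat + 8) w_same hs5e
        (by u_omega) (by u_omega) (by omega) hfS' hwS'
      have hs6' := Vorbis.Spec.residue_decode.slot_through (top := (u.reg .rsp).toNat + 8) w_same hs6e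
        (by u_omega) (by u_omega) (by omega) hfS' hwS'
      have hsf' := Vorbis.Spec.residue_decode.slot_through (top := (u.reg .rsp).toNat + 8) w_same hsfe
        (by u_omega) (by u_omega) (by omega) hfS' hwS'
      rw [w_rdi_10eb0e] at hpr
      have hrp' : ReaderPost Blk len u.mem s_10eb0er.mem (u.reg .rdi).toNat := hrp.trans (hst.1.trans hpr)
      have hun' : ShadowUntouched u.mem s_10eb0er.mem := Mem.EqOn.trans hune hpu
      have hrd' : s_10eb0er.mem.readLE (u.reg .rsi) 4 = dN :=
        Vorbis.Spec.residue_decode.read_through hsame' rd rfl (by omega) (by omega) hfb hwb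
      clear hs0e hs1e hs2e hs3e hs4e hs5e hs6e hsfe hs0 hs1 hs2 hs3 hs4 hs5 hs6 hsf hsame hun hrp hs' hst hune hpu hpr
      rcases hres with w_rax | w_rax
      · -- eax = 0 (0x10eb17, C 2120 `return FALSE`): `jmp 10ead6`, the epilogue, the `ret`
        u_walk hcode [hμ.vendor] until [Vorbis.L.residue_decode.loop2] span [Vorbis.L.textLo, Vorbis.L.textHi] side (v_side)
        · exact absurd (by decide) hbr_10eb15
        · exact absurd (by decide) hbr_10eb15
        · refine ReachVia.done (Or.inl ?_)
          v_returned
          · refine ⟨?_, ?_, Or.inl ?_⟩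
            · rw [w_mem]
              exact hun'
            · rw [w_mem]
              exact hrp'
            · exact w_rax
          · simp only [X86.User.Spec.footprint, vspec, argU32, hn, hoff]
            rw [w_mem]
            exact hsame'
      · -- eax = 1: `k += book->dimensions ; offset += book->dimensions` (0x10eae5 – 0x10eaf3, C 2122, 2123), the back edge
        u_walk hcode [hμ.vendor] until [Vorbis.L.residue_decode.loop2] span [Vorbis.L.textLo, Vorbis.L.textHi] side (v_side)
        · -- 0x10eae8, C 2122: load4 book->dimensions
          have hunc : ShadowUntouched u.mem s_10eae8.mem := by
            rw [w_mem]
            exact Vorbis.Spec.residue_decode.untouched_store hun' _ 8 _ (by u_omega)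
          exact Vorbis.Spec.check_site hsh.inv hunc hsite rfl
        · -- the back edge: k + d, offset + k + d; the check's return address is one more store into our stack
          have hkN : s_10eaf3.reg .rbx = UInt64.ofNat (k + dN) := by
            rw [w_rbx]
            exact Vorbis.Spec.residue_decode.add32_ofNat k dN (by omega)
          have hbpN : s_10eaf3.reg .rbp = UInt64.ofNat (off + (k + dN)) := by
            rw [w_rbp, Vorbis.Spec.residue_decode.add32_ofNat (off + k) dN (by omega), Nat.add_assoc]
          have hkleN : k + dN ≤ 73727 := by omega
          have hsameN : Mem.SameExcept [⟨(u.reg .rsp).toNat - 592, (u.reg .rsp).toNat⟩,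
              ⟨(u.reg .rdi).toNat + 48, (u.reg .rdi).toNat + 56⟩, ⟨(u.reg .rdi).toNat + 84, (u.reg .rdi).toNat + 96⟩,
              ⟨(u.reg .rdi).toNat + 136, (u.reg .rdi).toNat + 144⟩, ⟨(u.reg .rdi).toNat + 1484, (u.reg .rdi).toNat + 1749⟩,
              ⟨(u.reg .rdi).toNat + 1752, (u.reg .rdi).toNat + 1784⟩,
              ⟨(u.reg .rdx).toNat + 4 * off, (u.reg .rdx).toNat + 4 * off + 4 * n⟩] u.mem s_10eaf3.mem := by
            rw [w_mem]
            exact hsame'.step_writeLE' _ 8 _ (by u_omega)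
              ⟨_, List.mem_cons_self, by simp only []; u_omega, by simp only []; u_omega⟩
          have hunN : ShadowUntouched u.mem s_10eaf3.mem := by
            rw [w_mem]
            exact Vorbis.Spec.residue_decode.untouched_store hun' _ 8 _ (by u_omega)
          have hrpN : ReaderPost Blk len u.mem s_10eaf3.mem (u.reg .rdi).toNat := by
            rw [w_mem]
            exact hrp'.trans (Reader.store_off_obj hrp'.bits (u.reg .rsp - 80) 8 1108717 (by u_omega) (by u_omega)).1
          have hs0N : UInt64.ofNat (s_10eaf3.mem.readLE (u.reg .rsp) 8) = ret := by u_frame hs0'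
          have hs1N : UInt64.ofNat (s_10eaf3.mem.readLE (u.reg .rsp - 8) 8) = u.reg .r15 := by u_frame hs1'
          have hs2N : UInt64.ofNat (s_10eaf3.mem.readLE (u.reg .rsp - 16) 8) = u.reg .r14 := by u_frame hs2'
          have hs3N : UInt64.ofNat (s_10eaf3.mem.readLE (u.reg .rsp - 24) 8) = u.reg .r13 := by u_frame hs3'
          have hs4N : UInt64.ofNat (s_10eaf3.mem.readLE (u.reg .rsp - 32) 8) = u.reg .r12 := by u_frame hs4'
          have hs5N : UInt64.ofNat (s_10eaf3.mem.readLE (u.reg .rsp - 40) 8) = u.reg .rbp := by u_frame hs5'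
          have hs6N : UInt64.ofNat (s_10eaf3.mem.readLE (u.reg .rsp - 48) 8) = u.reg .rbx := by u_frame hs6'
          have hsfN : UInt64.ofNat (s_10eaf3.mem.readLE (u.reg .rsp - 64) 8) = u.reg .rdi := by u_frame hsf'
          have hdfN : s_10eaf3.flags .df = false := by
            rw [w_flags]
            simp only [X86.User.df_setStatus]
            exact w_df_10eae8
          have hmxN : s_10eaf3.mxcsr &&& 0x1F80 = 0x1F80 := by
            rw [w_mxcsr]
            exact w_mx
          u_loop_back [k + dN]
          -- the measure: d ≥ 1 (K1)
          rw [hkN, UInt64.toNat_ofNat', UInt64.toNat_ofNat']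
          omega
        · exact absurd hbr_10eb15 (by decide)
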